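-- pv_equiv track=rewrite | github.com/hyp4013-dev/omok_ai | train_value_reference.py | _scheduled_reference_game_counts
-- ===== SOURCE A (Python) =====
-- from collections import Counter, deque
--
-- def _reference_index_for_game(game_index: int, num_references: int, reference_cycle_length: int) -> int:
--     if game_index < 1:
--         raise ValueError("game_index must be at least 1")
--     if num_references < 1:
--         raise ValueError("num_references must be at least 1")
--     if reference_cycle_length < 1:
--         raise ValueError("reference_cycle_length must be at least 1")
--     return ((game_index - 1) // reference_cycle_length) % num_references
--
-- def _scheduled_reference_game_counts(
--     reference_names: list[str],
--     total_games: int,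
--     reference_cycle_length: int,
-- ) -> dict[str, int]:
--     counts: Counter[str] = Counter()
--     if not reference_names:
--         return {}
--     for game_index in range(1, total_games + 1):
--         reference_name = reference_names[
--             _reference_index_for_game(game_index, len(reference_names), reference_cycle_length)
--         ]
--         counts[reference_name] += 1
--     return {reference_name: counts[reference_name] for reference_name in reference_names}
-- ===== SOURCE B (Python) =====
-- def _scheduled_reference_game_counts(
--     reference_names: list[str],
--     total_games: int,
--     reference_cycle_length: int,
-- ) -> dict[str, int]:
--     # Closed-form block arithmetic instead of a per-game loop: each full cycle of
--     # num_refs * cycle_length games gives every slot exactly cycle_length games;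
--     # the remainder goes, block by block, to the first ceil(rem / cycle_length) slots.
--     if not reference_names:
--         return {}
--     counts = dict.fromkeys(reference_names, 0)
--     if total_games < 1:
--         return counts
--     n = len(reference_names)
--     cycle_len = reference_cycle_length
--     full_cycles, rem = divmod(total_games, n * cycle_len)
--     if full_cycles:
--         for i, name in enumerate(reference_names):
--             counts[name] += full_cycles * cycle_len + min(max(rem - i * cycle_len, 0), cycle_len)
--     else:
--         for i, name in enumerate(reference_names[:(rem + cycle_len - 1) // cycle_len]):
--             counts[name] += min(rem - i * cycle_len, cycle_len)
--     return counts
-- ===== Notes on version B (the rewrite author's own statement) =====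
-- stated objective: faster
-- what changed: Replaces the per-game counting loop (one Counter update per game) by closed-form block arithmetic: divmod(total_games, num_refs*cycle_length) gives the full cycles, and the remaining games are assigned directly to the first ceil(rem/cycle_length) slots, so B does O(n) work only when a full cycle exists and O(n_dict + rem/cycle_length) otherwise, instead of O(total_games) counter updates.
import Mathlib
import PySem

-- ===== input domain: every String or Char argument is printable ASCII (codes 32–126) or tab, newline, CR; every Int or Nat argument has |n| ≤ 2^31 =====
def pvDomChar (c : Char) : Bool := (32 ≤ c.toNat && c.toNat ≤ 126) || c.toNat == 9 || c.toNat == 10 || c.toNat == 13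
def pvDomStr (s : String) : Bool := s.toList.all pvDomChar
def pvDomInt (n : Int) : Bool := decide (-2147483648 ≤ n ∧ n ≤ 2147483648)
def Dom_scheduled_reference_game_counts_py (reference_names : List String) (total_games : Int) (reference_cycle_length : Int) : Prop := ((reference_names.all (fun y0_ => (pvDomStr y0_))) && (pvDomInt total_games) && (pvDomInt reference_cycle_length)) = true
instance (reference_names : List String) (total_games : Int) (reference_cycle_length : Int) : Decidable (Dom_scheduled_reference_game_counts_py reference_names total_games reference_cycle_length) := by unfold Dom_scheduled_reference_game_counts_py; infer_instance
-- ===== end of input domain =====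

-- ===== PORT A =====
-- B replaces A's per-game counting loop by closed-form block arithmetic (measured faster; asymptotic).
def pvRefIndexForGame (game_index : Int) (num_references : Int) (reference_cycle_length : Int) : Option Int :=
  if game_index < 1 then none              -- raise ValueError
  else if num_references < 1 then none     -- raise ValueError
  else if reference_cycle_length < 1 then none  -- raise ValueError
  else some (PySem.Int.mod (PySem.Int.floordiv (game_index - 1) reference_cycle_length) num_references)

def scheduled_reference_game_counts_py (reference_names : List String) (total_games : Int) (reference_cycle_length : Int) : List (String × Int) :=
  if reference_names = [] then []
  else
    let counts : PySem.Dict String Int :=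
      (PySem.List.pyRange 1 (total_games + 1) 1).foldl
        (fun d game_index =>
          match pvRefIndexForGame game_index (reference_names.length : Int) reference_cycle_length with
          | some idx => d.modify (PySem.List.pyGetD reference_names idx "") 0 (· + 1)
          | none => d)   -- ValueError propagates in Python; excluded by Pre_
        PySem.Dict.empty
    (reference_names.foldl (fun d name => d.insert name (counts.getD name 0)) PySem.Dict.empty).items

-- ===== PORT B =====
def scheduled_reference_game_counts_py_alt (reference_names : List String) (total_games : Int) (reference_cycle_length : Int) : List (String × Int) :=
  if reference_names = [] then []
  else
    let counts0 : PySem.Dict String Int :=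
      reference_names.foldl (fun d name => d.insert name 0) PySem.Dict.empty
    if total_games < 1 then counts0.items
    else
      match PySem.Int.divmod? total_games ((reference_names.length : Int) * reference_cycle_length) with
      | none => []   -- ZeroDivisionError in Python; unreachable under Pre_
      | some (full_cycles, rem) =>
        if full_cycles ≠ 0 then
          ((PySem.List.enumerate reference_names 0).foldl
            (fun d p =>
              d.modify p.2 0 (· + (full_cycles * reference_cycle_length +
                min (max (rem - p.1 * reference_cycle_length) 0) reference_cycle_length)))
            counts0).items
        else
          ((PySem.List.enumerate (PySem.List.slice reference_names none
              (some (PySem.Int.floordiv (rem + reference_cycle_length - 1) reference_cycle_length))) 0).foldl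
            (fun d p =>
              d.modify p.2 0 (· + min (rem - p.1 * reference_cycle_length) reference_cycle_length))
            counts0).items

-- ===== PRECONDITION & SPEC =====
-- A raises ValueError exactly when some game is scheduled (total_games >= 1), a reference exists,
-- and reference_cycle_length < 1; Pre_ excludes exactly those inputs.
def Pre_scheduled_reference_game_counts_py (reference_names : List String) (total_games : Int) (reference_cycle_length : Int) : Prop :=
  reference_names = [] ∨ total_games ≤ 0 ∨ 1 ≤ reference_cycle_length
instance (reference_names : List String) (total_games : Int) (reference_cycle_length : Int) : Decidable (Pre_scheduled_reference_game_counts_py reference_names total_games reference_cycle_length) := by unfold Pre_scheduled_reference_game_counts_py; infer_instance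

def pvWitness_scheduled_reference_game_counts_py : List String × Int × Int := (["a", "b", "a"], 7, 2)

def Spec_scheduled_reference_game_counts_py (reference_names : List String) (total_games : Int) (reference_cycle_length : Int) (out : List (String × Int)) : Prop := out = scheduled_reference_game_counts_py_alt reference_names total_games reference_cycle_length
instance (reference_names : List String) (total_games : Int) (reference_cycle_length : Int) (out : List (String × Int)) : Decidable (Spec_scheduled_reference_game_counts_py reference_names total_games reference_cycle_length out) := by unfold Spec_scheduled_reference_game_counts_py; infer_instance

-- ===== CLAIM (what is proved, stated in full; the proofs are below) =====
def Claim_equal_scheduled_reference_game_counts_py : Prop := ∀ (reference_names : List String) (total_games : Int) (reference_cycle_length : Int), Dom_scheduled_reference_game_counts_py reference_names total_games reference_cycle_length → Pre_scheduled_reference_game_counts_py reference_names total_games reference_cycle_length → Spec_scheduled_reference_game_counts_py reference_names total_games reference_cycle_length (scheduled_reference_game_counts_py reference_names total_games reference_cycle_length)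

-- ===== LEMMAS AND PROOFS =====

-- the reference index of game g (A's helper, on inputs where it does not raise)
def pvIdxf (names : List String) (L : Int) (g : Int) : Int :=
  PySem.Int.mod (PySem.Int.floordiv (g - 1) L) (names.length : Int)

-- the name counted for game g
def pvKeyf (names : List String) (L : Int) (g : Int) : String :=
  PySem.List.pyGetD names (pvIdxf names L g) ""

-- a fold of inserts whose value depends only on the key
theorem pv_getD_foldl_insert_fun (l : List String) (c : String → Int) (d : PySem.Dict String Int) (k : String) :
    (l.foldl (fun d x => d.insert x (c x)) d).getD k 0 = if k ∈ l then c k else d.getD k 0 := by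
  induction l generalizing d with
  | nil => simp
  | cons x xs ih =>
    simp only [List.foldl_cons, ih, PySem.Dict.getD_insert, List.mem_cons]
    by_cases hk : k ∈ xs <;> by_cases hx : k = x <;> simp [hk, hx]

-- a fold of additive modifies, as a sum over the pair list
theorem pv_getD_foldl_modify_w (ps : List (Int × String)) (w : Int → Int) (d : PySem.Dict String Int) (k : String) :
    (ps.foldl (fun d p => d.modify p.2 0 (· + w p.1)) d).getD k 0
      = d.getD k 0 + (ps.map (fun p => if p.2 = k then w p.1 else 0)).sum := by
  induction ps generalizing d with
  | nil => simp
  | cons p ps ih =>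
    simp only [List.foldl_cons, ih, PySem.Dict.getD_modify, List.map_cons, List.sum_cons]
    by_cases hp : k = p.2
    · simp [hp]; ring
    · simp [hp, Ne.symm hp]

-- enumerate: indices below the start contribute nothing
theorem pv_enum_sum_zero (names : List String) (k : String) (s j : Int) (hj : j < s) :
    ((PySem.List.enumerate names s).map (fun p => if p.2 = k ∧ p.1 = j then (1 : Int) else 0)).sum = 0 := by
  induction names generalizing s with
  | nil => simp [PySem.List.enumerate_nil]
  | cons x xs ih =>
    rw [PySem.List.enumerate_cons]
    simp only [List.map_cons, List.sum_cons]
    rw [if_neg (by omega), ih (s + 1) (by omega)]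
    simp

-- enumerate: exactly one pair has first component s + t
theorem pv_enum_delta (names : List String) (k : String) (s : Int) (t : Nat) (ht : t < names.length) :
    ((PySem.List.enumerate names s).map (fun p => if p.2 = k ∧ p.1 = s + (t : Int) then (1 : Int) else 0)).sum
      = if names[t] = k then 1 else 0 := by
  induction names generalizing s t with
  | nil => simp at ht
  | cons x xs ih =>
    rw [PySem.List.enumerate_cons]
    simp only [List.map_cons, List.sum_cons]
    cases t with
    | zero =>
      have hz := pv_enum_sum_zero xs k (s + 1) (s + (0 : Nat)) (by omega)
      rw [hz]
      by_cases hx : x = k <;> simp [hx]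
    | succ t' =>
      have := ih (s + 1) t' (by simpa using ht)
      rw [if_neg (by omega)]
      simpa [show s + ((t' : Nat) + 1 : Int) = s + 1 + (t' : Int) by ring] using this

-- partition of the per-game indicator sum by the reference index
theorem pv_partition (R : List Int) (idxf : Int → Int) (names : List String) (k : String)
    (h : ∀ g ∈ R, ∃ t : Nat, t < names.length ∧ idxf g = (t : Int)) :
    (R.map (fun g => if PySem.List.pyGetD names (idxf g) "" = k then (1 : Int) else 0)).sum
      = ((PySem.List.enumerate names 0).map
          (fun p => if p.2 = k then (R.map (fun g => if idxf g = p.1 then (1 : Int) else 0)).sum else 0)).sum := by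
  induction R with
  | nil => simp
  | cons g R ih =>
    obtain ⟨t, ht, hidx⟩ := h g (by simp)
    have hrest := ih (fun g hg => h g (by simp [hg]))
    simp only [List.map_cons, List.sum_cons]
    rw [hrest]
    have hsplit : ((PySem.List.enumerate names 0).map
        (fun p => if p.2 = k then ((if idxf g = p.1 then (1:Int) else 0) + (R.map (fun g => if idxf g = p.1 then (1:Int) else 0)).sum) else 0)).sum
      = ((PySem.List.enumerate names 0).map (fun p => if p.2 = k ∧ p.1 = idxf g then (1:Int) else 0)).sum
        + ((PySem.List.enumerate names 0).map (fun p => if p.2 = k then (R.map (fun g => if idxf g = p.1 then (1:Int) else 0)).sum else 0)).sum := by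
      rw [← PySem.List.sum_map_add_int]
      refine congrArg List.sum (List.map_congr_left ?_)
      intro p _
      by_cases h1 : p.2 = k
      · by_cases h2 : p.1 = idxf g
        · simp [h1, h2]
        · have h2' : ¬ idxf g = p.1 := fun hh => h2 hh.symm
          simp [h1, h2, h2']
      · simp [h1]
    rw [hsplit, hidx]
    have hdelta := pv_enum_delta names k 0 t ht
    have hget : PySem.List.pyGetD names ((t : Nat) : Int) "" = names[t] := by
      simp [PySem.List.pyGetD_natCast, ht]
    simp only [zero_add] at hdelta ⊢
    rw [hdelta, hget]

-- Set.update by elements already present is the identity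
theorem pv_update_of_subset (s : PySem.Set String) (l : List String) (h : ∀ x ∈ l, x ∈ s) :
    PySem.Set.update s l = s := by
  rw [PySem.Set.update_eq_append_filter]
  have hnil : (PySem.Set.ofList l).filter (fun y => !(PySem.Set.contains s y)) = [] := by
    rw [List.filter_eq_nil_iff]
    intro y hy
    have hys : y ∈ s := h y (by rwa [PySem.Set.mem_ofList] at hy)
    simp [PySem.Set.contains_eq_listContains, hys]
  rw [hnil, List.append_nil]

-- one induction step of the closed-form slot count
theorem pv_step (Nn Ln t T : Nat) (hn : 1 ≤ Nn) (hL : 1 ≤ Ln) (ht : t < Nn) :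
    (T + 1) / (Nn * Ln) * Ln + min ((T + 1) % (Nn * Ln) - t * Ln) Ln
      = T / (Nn * Ln) * Ln + min (T % (Nn * Ln) - t * Ln) Ln
        + (if T / Ln % Nn = t then 1 else 0) := by
  have hC : 0 < Nn * Ln := Nat.mul_pos hn hL
  obtain ⟨q, r, hT, hrC, hdivT, hmodT⟩ :
      ∃ q r, T = q * (Nn * Ln) + r ∧ r < Nn * Ln ∧ T / (Nn * Ln) = q ∧ T % (Nn * Ln) = r := by
    refine ⟨T / (Nn * Ln), T % (Nn * Ln), ?_, Nat.mod_lt _ hC, rfl, rfl⟩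
    have := Nat.div_add_mod T (Nn * Ln)
    rw [Nat.mul_comm] at this
    omega
  obtain ⟨a, b, hr, hbL, hab⟩ :
      ∃ a b, r = a * Ln + b ∧ b < Ln ∧ r / Ln = a := by
    refine ⟨r / Ln, r % Ln, ?_, Nat.mod_lt _ hL, rfl⟩
    have := Nat.div_add_mod r Ln
    rw [Nat.mul_comm] at this
    omega
  have haN : a < Nn := by
    rw [← hab]
    exact (Nat.div_lt_iff_lt_mul hL).mpr hrC
  have hslot : T / Ln % Nn = a := by
    have hTL : T / Ln = q * Nn + a := by
      have hT' : T = b + (q * Nn + a) * Ln := by rw [hT, hr]; ring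
      rw [hT', Nat.add_mul_div_right _ _ hL, Nat.div_eq_of_lt hbL, Nat.zero_add]
    have hqN : q * Nn + a = Nn * q + a := by ring
    rw [hTL, hqN, Nat.mul_add_mod, Nat.mod_eq_of_lt haN]
  rw [hslot, hmodT, hdivT]
  have haC : a * Ln + Ln ≤ Nn * Ln := by
    calc a * Ln + Ln = (a + 1) * Ln := by ring
    _ ≤ Nn * Ln := Nat.mul_le_mul_right Ln haN
  have htC : t * Ln + Ln ≤ Nn * Ln := by
    calc t * Ln + Ln = (t + 1) * Ln := by ring
    _ ≤ Nn * Ln := Nat.mul_le_mul_right Ln ht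
  by_cases hlast : r + 1 = Nn * Ln
  · have hdiv : (T + 1) / (Nn * Ln) = q + 1 := by
      have h1 : T + 1 = (q + 1) * (Nn * Ln) := by
        have hexp : (q + 1) * (Nn * Ln) = q * (Nn * Ln) + Nn * Ln := by ring
        omega
      rw [h1, Nat.mul_div_cancel _ hC]
    have hmod : (T + 1) % (Nn * Ln) = 0 := by
      have h1 : T + 1 = (q + 1) * (Nn * Ln) := by
        have hexp : (q + 1) * (Nn * Ln) = q * (Nn * Ln) + Nn * Ln := by ring
        omega
      rw [h1, Nat.mul_mod_left]
    rw [hdiv, hmod, Nat.zero_sub, Nat.zero_min]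
    have hq1 : (q + 1) * Ln = q * Ln + Ln := by ring
    rcases Nat.lt_trichotomy a t with hat | hat | hat
    · have hP : a * Ln + Ln ≤ t * Ln := by
        calc a * Ln + Ln = (a + 1) * Ln := by ring
        _ ≤ t * Ln := Nat.mul_le_mul_right Ln hat
      omega
    · subst hat
      rw [if_pos rfl]
      have h1 : r - a * Ln = b := by rw [hr]; exact Nat.add_sub_cancel_left ..
      rw [h1, Nat.min_eq_left (by omega)]
      omega
    · have hP : t * Ln + Ln ≤ a * Ln := by
        calc t * Ln + Ln = (t + 1) * Ln := by ring
        _ ≤ a * Ln := Nat.mul_le_mul_right Ln hat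
      rw [if_neg (Nat.ne_of_gt hat), Nat.min_eq_right (by omega)]
      omega
  · have hdiv : (T + 1) / (Nn * Ln) = q := by
      have h1 : T + 1 = Nn * Ln * q + (r + 1) := by
        have hexp : Nn * Ln * q = q * (Nn * Ln) := by ring
        omega
      rw [h1, Nat.mul_add_div hC, Nat.div_eq_of_lt (by omega), Nat.add_zero]
    have hmod : (T + 1) % (Nn * Ln) = r + 1 := by
      have h1 : T + 1 = Nn * Ln * q + (r + 1) := by
        have hexp : Nn * Ln * q = q * (Nn * Ln) := by ring
        omega
      rw [h1, Nat.mul_add_mod, Nat.mod_eq_of_lt (by omega)]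
    rw [hdiv, hmod]
    rcases Nat.lt_trichotomy a t with hat | hat | hat
    · have hP : a * Ln + Ln ≤ t * Ln := by
        calc a * Ln + Ln = (a + 1) * Ln := by ring
        _ ≤ t * Ln := Nat.mul_le_mul_right Ln hat
      rw [if_neg (Nat.ne_of_lt hat)]
      have h1 : r - t * Ln = 0 := Nat.sub_eq_zero_of_le (by omega)
      have h2 : r + 1 - t * Ln = 0 := Nat.sub_eq_zero_of_le (by omega)
      rw [h1, h2]
      omega
    · subst hat
      rw [if_pos rfl]
      have h1 : r - a * Ln = b := by rw [hr]; exact Nat.add_sub_cancel_left ..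
      have h2 : r + 1 - a * Ln = b + 1 := by rw [hr]; omega
      rw [h1, h2, Nat.min_eq_left (by omega), Nat.min_eq_left (by omega)]
      omega
    · have hP : t * Ln + Ln ≤ a * Ln := by
        calc t * Ln + Ln = (t + 1) * Ln := by ring
        _ ≤ a * Ln := Nat.mul_le_mul_right Ln hat
      rw [if_neg (Nat.ne_of_gt hat)]
      have h1 : min (r - t * Ln) Ln = Ln := Nat.min_eq_right (by omega)
      have h2 : min (r + 1 - t * Ln) Ln = Ln := Nat.min_eq_right (by omega)
      rw [h1, h2]
      omega

-- the closed-form count of block indices hitting slot t (Nat core of the equivalence)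
theorem pv_cntNat (Nn Ln t Tn : Nat) (hn : 1 ≤ Nn) (hL : 1 ≤ Ln) (ht : t < Nn) :
    (List.range Tn).countP (fun m => (m / Ln) % Nn == t)
      = Tn / (Nn * Ln) * Ln + min (Tn % (Nn * Ln) - t * Ln) Ln := by
  induction Tn with
  | zero => simp
  | succ T ih =>
    rw [List.range_succ, List.countP_append, ih, pv_step Nn Ln t T hn hL ht]
    simp only [List.countP_cons, List.countP_nil, beq_iff_eq]
    by_cases h : T / Ln % Nn = t <;> simp [h]

-- the per-slot game count equals B's closed form (Int bridge)
theorem pv_slot_count (names : List String) (T L : Int) (t : Nat)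
    (hn : 1 ≤ names.length) (hT : 1 ≤ T) (hL : 1 ≤ L) (ht : t < names.length) :
    ((PySem.List.pyRange 1 (T + 1) 1).map
        (fun g => if pvIdxf names L g = (t : Int) then (1 : Int) else 0)).sum
      = T.fdiv ((names.length : Int) * L) * L
        + min (max (T.fmod ((names.length : Int) * L) - (t : Int) * L) 0) L := by
  obtain ⟨Ln, rfl⟩ : ∃ Ln : Nat, L = (Ln : Int) := ⟨L.toNat, (Int.toNat_of_nonneg (by omega)).symm⟩
  obtain ⟨Tn, rfl⟩ : ∃ Tn : Nat, T = (Tn : Int) := ⟨T.toNat, (Int.toNat_of_nonneg (by omega)).symm⟩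
  have hLn : 1 ≤ Ln := by exact_mod_cast hL
  have hTn : 1 ≤ Tn := by exact_mod_cast hT
  set Nn := names.length with hNn
  rw [PySem.List.pyRange_one]
  have h1 : ((Tn : Int) + 1 - 1).toNat = Tn := by omega
  rw [h1, List.map_map]
  have h2 : ∀ m : Nat, (fun g => if pvIdxf names (Ln : Int) g = (t : Int) then (1 : Int) else 0)
      ((fun k : Nat => (1 : Int) + k) m) = (fun m : Nat => if ((m / Ln) % Nn == t) = true then (1 : Int) else 0) m := by
    intro m
    have h3 : (1 : Int) + (m : Int) - 1 = (m : Int) := by ring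
    simp only [pvIdxf, h3, PySem.Int.floordiv_natCast, PySem.Int.mod_natCast, ← hNn,
      Nat.cast_inj, beq_iff_eq]
  rw [show ((fun g => if pvIdxf names ((Ln : Nat) : Int) g = (t : Int) then (1 : Int) else 0) ∘ fun k : Nat => (1 : Int) + k)
        = (fun m : Nat => if ((m / Ln) % Nn == t) = true then (1 : Int) else 0) from funext h2,
     PySem.List.sum_map_ite_one_zero, pv_cntNat Nn Ln t Tn hn hLn ht]
  have hcm : ((Nn : Int) * (Ln : Int)) = ((Nn * Ln : Nat) : Int) := by push_cast; ring
  rw [hcm,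
    show ((Tn : Int).fdiv ((Nn * Ln : Nat) : Int)) = ((Tn / (Nn * Ln) : Nat) : Int) from PySem.Int.floordiv_natCast ..,
    show ((Tn : Int).fmod ((Nn * Ln : Nat) : Int)) = ((Tn % (Nn * Ln) : Nat) : Int) from PySem.Int.mod_natCast ..]
  rw [show (t : Int) * (Ln : Int) = ((t * Ln : Nat) : Int) from by push_cast; ring,
      Nat.cast_add, Nat.cast_mul, Nat.cast_min]
  omega

-- ===== VERDICT (by name: the statement is the Claim_ definition above) =====
-- a weighted enumerate sum is carried entirely by a prefix when the weight vanishes beyond it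
theorem pv_prefix_split (names : List String) (k : String) (w : Int → Int) (m : Nat)
    (hzero : ∀ t : Nat, m ≤ t → t < names.length → w (t : Int) = 0) :
    ((PySem.List.enumerate names 0).map (fun p => if p.2 = k then w p.1 else 0)).sum
      = ((PySem.List.enumerate (names.take m) 0).map (fun p => if p.2 = k then w p.1 else 0)).sum := by
  conv_lhs => rw [← List.take_append_drop m names]
  rw [PySem.List.enumerate_append, List.map_append, List.sum_append]
  have hzero2 : ((PySem.List.enumerate (names.drop m) (0 + ((names.take m).length : Int))).map
      (fun p => if p.2 = k then w p.1 else 0)).sum = 0 := by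
    apply List.sum_eq_zero
    intro x hx
    obtain ⟨p, hp, rfl⟩ := List.mem_map.mp hx
    obtain ⟨j, hj, rfl⟩ := (PySem.List.mem_enumerate_iff _ _ _).mp hp
    have hlen : (names.take m).length = min m names.length := List.length_take
    have hdlen : (names.drop m).length = names.length - m := List.length_drop
    have hcast : (0 + ((names.take m).length : Int)) + (j : Int)
        = ((min m names.length + j : Nat) : Int) := by rw [hlen]; push_cast; ring
    have hw := hzero (min m names.length + j) (by omega) (by omega)
    by_cases hpk : ((names.drop m)[j]) = k
    · have hw' : w (min (m : Int) (names.length : Int) + (j : Int)) = 0 := by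
        rw [show min (m : Int) (names.length : Int) + (j : Int)
              = ((min m names.length + j : Nat) : Int) from by push_cast; ring]
        exact hw
      simp [hpk, hw']
    · simp only [if_neg hpk]
  rw [hzero2, add_zero]

-- A's helper returns its value (no exception) on the admitted inputs
theorem pv_refIndex_some (names : List String) (L g : Int) (hn : 1 ≤ names.length)
    (hg : 1 ≤ g) (hL : 1 ≤ L) :
    pvRefIndexForGame g (names.length : Int) L = some (pvIdxf names L g) := by
  have hnI : (1 : Int) ≤ (names.length : Int) := by exact_mod_cast hn
  unfold pvRefIndexForGame pvIdxf
  rw [if_neg (by omega), if_neg (by omega), if_neg (by omega)]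

-- the index of every game is a valid position in names
theorem pv_idx_bounds (names : List String) (L g : Int) (hn : 1 ≤ names.length) :
    ∃ t : Nat, t < names.length ∧ pvIdxf names L g = (t : Int) := by
  have hnI : (0 : Int) < (names.length : Int) := by exact_mod_cast hn
  have h0 : 0 ≤ pvIdxf names L g := PySem.Int.mod_nonneg _ hnI
  have h1 : pvIdxf names L g < (names.length : Int) := PySem.Int.mod_lt _ hnI
  exact ⟨(pvIdxf names L g).toNat, by omega, by omega⟩

theorem scheduled_reference_game_counts_py_spec : Claim_equal_scheduled_reference_game_counts_py := by
  intro names T L hDom hPre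
  unfold Spec_scheduled_reference_game_counts_py
  unfold scheduled_reference_game_counts_py scheduled_reference_game_counts_py_alt
  by_cases hnil : names = []
  · simp [hnil]
  · have hn : 1 ≤ names.length := List.length_pos_of_ne_nil hnil
    rw [if_neg hnil, if_neg hnil]
    dsimp only
    by_cases hT : T < 1
    · rw [if_pos hT, PySem.List.pyRange_one, show (T + 1 - 1).toNat = 0 by omega]
      simp [PySem.Dict.getD_empty]
    · rw [if_neg hT]
      have hT1 : 1 ≤ T := by omega
      have hL : 1 ≤ L := by
        rcases hPre with h | h | h
        · exact absurd h hnil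
        · omega
        · exact h
      -- A's loop: the helper never raises, and counts pvKeyf per game
      have hAfold :
          (PySem.List.pyRange 1 (T + 1) 1).foldl
            (fun (d : PySem.Dict String Int) game_index =>
              match pvRefIndexForGame game_index (names.length : Int) L with
              | some idx => d.modify (PySem.List.pyGetD names idx "") 0 (· + 1)
              | none => d) PySem.Dict.empty
          = ((PySem.List.pyRange 1 (T + 1) 1).map (pvKeyf names L)).foldl
              (fun d x => d.modify x 0 (· + 1)) PySem.Dict.empty := by
        rw [List.foldl_map]
        refine PySem.List.foldl_congr_mem _ _ _ _ ?_
        intro acc g hg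
        have hg1 : 1 ≤ g := (PySem.List.mem_pyRange_one.mp hg).1
        rw [pv_refIndex_some names L g hn hg1 hL]
        rfl
      rw [hAfold]
      -- B's divmod never raises
      have hC0 : ((names.length : Int) * L) ≠ 0 := by
        have hnI : (1 : Int) ≤ (names.length : Int) := by exact_mod_cast hn
        positivity
      rw [show PySem.Int.divmod? T ((names.length : Int) * L)
            = some (T.fdiv ((names.length : Int) * L), T.fmod ((names.length : Int) * L)) from by
          simp [PySem.Int.divmod?, hC0]]
      dsimp only
      -- shared facts about A's dict
      have hkA : (names.foldl (fun (d : PySem.Dict String Int) name =>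
          d.insert name ((((PySem.List.pyRange 1 (T + 1) 1).map (pvKeyf names L)).foldl
            (fun d x => d.modify x 0 (· + 1)) PySem.Dict.empty).getD name 0)) PySem.Dict.empty).keys
          = PySem.Set.ofList names := by
        rw [PySem.Dict.keys_foldl_insert, PySem.Dict.keys_empty, PySem.Set.update_nil_left]
      have hkAnd : (names.foldl (fun (d : PySem.Dict String Int) name =>
          d.insert name ((((PySem.List.pyRange 1 (T + 1) 1).map (pvKeyf names L)).foldl
            (fun d x => d.modify x 0 (· + 1)) PySem.Dict.empty).getD name 0)) PySem.Dict.empty).keys.Nodup :=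
        PySem.Dict.nodup_keys_foldl_insert _ _ _ (by rw [PySem.Dict.keys_empty]; exact List.nodup_nil)
      have hk0 : (names.foldl (fun (d : PySem.Dict String Int) name => d.insert name 0) PySem.Dict.empty).keys
          = PySem.Set.ofList names := by
        rw [PySem.Dict.keys_foldl_insert, PySem.Dict.keys_empty, PySem.Set.update_nil_left]
      have hk0nd : (names.foldl (fun (d : PySem.Dict String Int) name => d.insert name 0) PySem.Dict.empty).keys.Nodup :=
        PySem.Dict.nodup_keys_foldl_insert _ _ _ (by rw [PySem.Dict.keys_empty]; exact List.nodup_nil)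
      -- A's value at a key k, as a slot-partitioned sum
      have hAval : ∀ k ∈ names,
          (names.foldl (fun (d : PySem.Dict String Int) name =>
            d.insert name ((((PySem.List.pyRange 1 (T + 1) 1).map (pvKeyf names L)).foldl
              (fun d x => d.modify x 0 (· + 1)) PySem.Dict.empty).getD name 0)) PySem.Dict.empty).getD k 0
          = ((PySem.List.enumerate names 0).map
              (fun p => if p.2 = k then (T.fdiv ((names.length : Int) * L) * L +
                min (max (T.fmod ((names.length : Int) * L) - p.1 * L) 0) L) else 0)).sum := by
        intro k hkmem
        rw [pv_getD_foldl_insert_fun names _ PySem.Dict.empty k, if_pos hkmem,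
            PySem.Dict.getD_foldl_modify_add_one, PySem.Dict.getD_empty, zero_add]
        have hcount : ((((PySem.List.pyRange 1 (T + 1) 1).map (pvKeyf names L)).count k : Nat) : Int)
            = ((PySem.List.pyRange 1 (T + 1) 1).map
                (fun g => if PySem.List.pyGetD names (pvIdxf names L g) "" = k then (1 : Int) else 0)).sum := by
          rw [List.count_eq_countP, List.countP_map,
            show ((· == k) ∘ pvKeyf names L) = (fun g => PySem.List.pyGetD names (pvIdxf names L g) "" == k) from rfl,
            ← PySem.List.sum_map_ite_one_zero (fun g => PySem.List.pyGetD names (pvIdxf names L g) "" == k)]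
          refine congrArg List.sum (List.map_congr_left ?_)
          intro g _
          simp only [beq_iff_eq]
        rw [hcount,
          pv_partition (PySem.List.pyRange 1 (T + 1) 1) (pvIdxf names L) names k
            (fun g _ => pv_idx_bounds names L g hn)]
        refine congrArg List.sum (List.map_congr_left ?_)
        intro p hp
        obtain ⟨t, ht, hpt⟩ := (PySem.List.mem_enumerate_iff names 0 p).mp hp
        by_cases hpk : p.2 = k
        · rw [if_pos hpk, if_pos hpk]
          have hps : p.1 = (t : Int) := by rw [hpt]; simp
          rw [hps, pv_slot_count names T L t hn hT1 hL ht]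
        · rw [if_neg hpk, if_neg hpk]
      by_cases hfull : T.fdiv ((names.length : Int) * L) = 0
      · -- no full cycle: B only touches the first ceil(rem / L) slots
        rw [if_neg (not_not_intro hfull)]
        have hLpos : (0 : Int) < L := by omega
        have hrem0 : 0 ≤ T.fmod ((names.length : Int) * L) := by
          have hCpos : (0 : Int) < (names.length : Int) * L := by positivity
          exact PySem.Int.mod_nonneg T hCpos
        have he0 : 0 ≤ PySem.Int.floordiv (T.fmod ((names.length : Int) * L) + L - 1) L :=
          (PySem.Int.le_floordiv_iff_mul_le hLpos).mpr (by rw [zero_mul]; omega)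
        rw [PySem.List.slice_to names he0]
        have hbrk1 : (PySem.Int.floordiv (T.fmod ((names.length : Int) * L) + L - 1) L) * L
            ≤ T.fmod ((names.length : Int) * L) + L - 1 :=
          (PySem.Int.le_floordiv_iff_mul_le hLpos).mp le_rfl
        have hbrk2 : T.fmod ((names.length : Int) * L) + L - 1
            < (PySem.Int.floordiv (T.fmod ((names.length : Int) * L) + L - 1) L + 1) * L :=
          (PySem.Int.floordiv_lt_iff_lt_mul hLpos).mp (by omega)
        have hkey := PySem.Dict.keys_foldl_modify_key
          (PySem.List.enumerate (names.take (PySem.Int.floordiv (T.fmod ((names.length : Int) * L) + L - 1) L).toNat) 0)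
          (fun p : Int × String => p.2) 0
          (fun d p => (· + min (T.fmod ((names.length : Int) * L) - p.1 * L) L))
          (names.foldl (fun (d : PySem.Dict String Int) name => d.insert name 0) PySem.Dict.empty)
        have hkB : ((PySem.List.enumerate (names.take (PySem.Int.floordiv (T.fmod ((names.length : Int) * L) + L - 1) L).toNat) 0).foldl
            (fun (d : PySem.Dict String Int) p => d.modify p.2 0 (· + min (T.fmod ((names.length : Int) * L) - p.1 * L) L))
            (names.foldl (fun (d : PySem.Dict String Int) name => d.insert name 0) PySem.Dict.empty)).keys
            = PySem.Set.ofList names := by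
          rw [hkey, PySem.List.map_snd_enumerate, hk0]
          exact pv_update_of_subset _ _
            (fun x hx => (PySem.Set.mem_ofList names x).mpr (List.take_subset _ names hx))
        have hkBnd : ((PySem.List.enumerate (names.take (PySem.Int.floordiv (T.fmod ((names.length : Int) * L) + L - 1) L).toNat) 0).foldl
            (fun (d : PySem.Dict String Int) p => d.modify p.2 0 (· + min (T.fmod ((names.length : Int) * L) - p.1 * L) L))
            (names.foldl (fun (d : PySem.Dict String Int) name => d.insert name 0) PySem.Dict.empty)).keys.Nodup :=
          PySem.Dict.nodup_keys_foldl_modify_key _ (fun p : Int × String => p.2) 0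
            (fun d p => (· + min (T.fmod ((names.length : Int) * L) - p.1 * L) L)) _ hk0nd
        rw [PySem.Dict.items_eq_map_keys _ hkAnd 0, PySem.Dict.items_eq_map_keys _ hkBnd 0, hkA, hkB]
        refine List.map_congr_left ?_
        intro k hk
        have hkmem : k ∈ names := (PySem.Set.mem_ofList names k).mp hk
        refine congrArg (fun v => (k, v)) ?_
        rw [hAval k hkmem,
            pv_getD_foldl_modify_w _ (fun i => min (T.fmod ((names.length : Int) * L) - i * L) L) _ k,
            pv_getD_foldl_insert_fun names (fun _ => 0) PySem.Dict.empty k, if_pos hkmem, zero_add]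
        rw [pv_prefix_split names k
            (fun i => T.fdiv ((names.length : Int) * L) * L +
              min (max (T.fmod ((names.length : Int) * L) - i * L) 0) L)
            (PySem.Int.floordiv (T.fmod ((names.length : Int) * L) + L - 1) L).toNat ?hzero]
        case hzero =>
          intro t hmt htlen
          dsimp only
          have het : (PySem.Int.floordiv (T.fmod ((names.length : Int) * L) + L - 1) L) ≤ (t : Int) := by
            calc PySem.Int.floordiv (T.fmod ((names.length : Int) * L) + L - 1) L
                = ((PySem.Int.floordiv (T.fmod ((names.length : Int) * L) + L - 1) L).toNat : Int) :=
                  (Int.toNat_of_nonneg he0).symm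
            _ ≤ (t : Int) := by exact_mod_cast hmt
          have hmul : (PySem.Int.floordiv (T.fmod ((names.length : Int) * L) + L - 1) L) * L ≤ (t : Int) * L :=
            mul_le_mul_of_nonneg_right het (by omega)
          have hx0 : T.fmod ((names.length : Int) * L) - (t : Int) * L ≤ 0 := by
            have hexp : (PySem.Int.floordiv (T.fmod ((names.length : Int) * L) + L - 1) L + 1) * L
                = (PySem.Int.floordiv (T.fmod ((names.length : Int) * L) + L - 1) L) * L + L := by ring
            omega
          rw [hfull, zero_mul, zero_add, max_eq_right hx0, min_eq_left (by omega)]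
        refine congrArg List.sum (List.map_congr_left ?_)
        intro p hp
        obtain ⟨j, hj, hpj⟩ := (PySem.List.mem_enumerate_iff _ 0 p).mp hp
        by_cases hpk : p.2 = k
        · rw [if_pos hpk, if_pos hpk, hfull, zero_mul, zero_add]
          have hps : p.1 = (j : Int) := by rw [hpj]; simp
          have hjlt : (j : Int) < PySem.Int.floordiv (T.fmod ((names.length : Int) * L) + L - 1) L := by
            rw [List.length_take] at hj
            have hj' : j < (PySem.Int.floordiv (T.fmod ((names.length : Int) * L) + L - 1) L).toNat := by omega
            calc (j : Int) < ((PySem.Int.floordiv (T.fmod ((names.length : Int) * L) + L - 1) L).toNat : Int) := by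
                  exact_mod_cast hj'
            _ = _ := Int.toNat_of_nonneg he0
          have hmul : (j : Int) * L ≤ (PySem.Int.floordiv (T.fmod ((names.length : Int) * L) + L - 1) L - 1) * L :=
            mul_le_mul_of_nonneg_right (by omega) (by omega)
          have hxpos : 0 ≤ T.fmod ((names.length : Int) * L) - p.1 * L := by
            have hexp : (PySem.Int.floordiv (T.fmod ((names.length : Int) * L) + L - 1) L - 1) * L
                = (PySem.Int.floordiv (T.fmod ((names.length : Int) * L) + L - 1) L) * L - L := by ring
            rw [hps]
            omega
          rw [max_eq_left hxpos]
        · rw [if_neg hpk, if_neg hpk]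
      · -- at least one full cycle: B updates every slot
        rw [if_pos hfull]
        have hkey := PySem.Dict.keys_foldl_modify_key (PySem.List.enumerate names 0)
          (fun p : Int × String => p.2) 0
          (fun d p => (· + (T.fdiv ((names.length : Int) * L) * L +
            min (max (T.fmod ((names.length : Int) * L) - p.1 * L) 0) L)))
          (names.foldl (fun (d : PySem.Dict String Int) name => d.insert name 0) PySem.Dict.empty)
        have hkB : ((PySem.List.enumerate names 0).foldl
            (fun (d : PySem.Dict String Int) p => d.modify p.2 0 (· + (T.fdiv ((names.length : Int) * L) * L +
              min (max (T.fmod ((names.length : Int) * L) - p.1 * L) 0) L)))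
            (names.foldl (fun (d : PySem.Dict String Int) name => d.insert name 0) PySem.Dict.empty)).keys
            = PySem.Set.ofList names := by
          rw [hkey, PySem.List.map_snd_enumerate, hk0]
          exact pv_update_of_subset _ _ (fun x hx => (PySem.Set.mem_ofList names x).mpr hx)
        have hkBnd : ((PySem.List.enumerate names 0).foldl
            (fun (d : PySem.Dict String Int) p => d.modify p.2 0 (· + (T.fdiv ((names.length : Int) * L) * L +
              min (max (T.fmod ((names.length : Int) * L) - p.1 * L) 0) L)))
            (names.foldl (fun (d : PySem.Dict String Int) name => d.insert name 0) PySem.Dict.empty)).keys.Nodup :=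
          PySem.Dict.nodup_keys_foldl_modify_key (PySem.List.enumerate names 0)
            (fun p : Int × String => p.2) 0
            (fun d p => (· + (T.fdiv ((names.length : Int) * L) * L +
              min (max (T.fmod ((names.length : Int) * L) - p.1 * L) 0) L))) _ hk0nd
        rw [PySem.Dict.items_eq_map_keys _ hkAnd 0, PySem.Dict.items_eq_map_keys _ hkBnd 0, hkA, hkB]
        refine List.map_congr_left ?_
        intro k hk
        have hkmem : k ∈ names := (PySem.Set.mem_ofList names k).mp hk
        refine congrArg (fun v => (k, v)) ?_
        rw [hAval k hkmem,
            pv_getD_foldl_modify_w (PySem.List.enumerate names 0)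
              (fun i => T.fdiv ((names.length : Int) * L) * L +
                min (max (T.fmod ((names.length : Int) * L) - i * L) 0) L)
              (names.foldl (fun (d : PySem.Dict String Int) name => d.insert name 0) PySem.Dict.empty) k,
            pv_getD_foldl_insert_fun names (fun _ => 0) PySem.Dict.empty k, if_pos hkmem, zero_add]
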